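-- pv_equiv track=rewrite | github.com/soyanggaeng/Visfolio | python/backtest_processing.py | find_market_for_item
-- ===== SOURCE A (Python) =====
-- def find_market_for_item(item, us_stock_names, korea_stock_names):
--     for market, names in us_stock_names.items():
--         for name in names:
--             if item == name:
--                 return "US Stock Market", market
--     for market, names in korea_stock_names.items():
--         for name in names:
--             if item == name:
--                 return "Korea Stock Market", market
--     return None, None
-- ===== SOURCE B (Python) =====
-- def find_market_for_item(item, us_stock_names, korea_stock_names):
--     index = {}
--     for market, names in us_stock_names.items():
--         for name in names:
--             index.setdefault(name, ("US Stock Market", market))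
--     for market, names in korea_stock_names.items():
--         for name in names:
--             index.setdefault(name, ("Korea Stock Market", market))
--     return index.get(item, (None, None))
-- ===== Notes on version B (the rewrite author's own statement) =====
-- stated objective: alternative
-- what changed: B replaces A's nested scans with early return by building a reverse-lookup dict (name -> (label, market)) via setdefault in priority order (US first), then answering with a single dict lookup.
import Mathlib
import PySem

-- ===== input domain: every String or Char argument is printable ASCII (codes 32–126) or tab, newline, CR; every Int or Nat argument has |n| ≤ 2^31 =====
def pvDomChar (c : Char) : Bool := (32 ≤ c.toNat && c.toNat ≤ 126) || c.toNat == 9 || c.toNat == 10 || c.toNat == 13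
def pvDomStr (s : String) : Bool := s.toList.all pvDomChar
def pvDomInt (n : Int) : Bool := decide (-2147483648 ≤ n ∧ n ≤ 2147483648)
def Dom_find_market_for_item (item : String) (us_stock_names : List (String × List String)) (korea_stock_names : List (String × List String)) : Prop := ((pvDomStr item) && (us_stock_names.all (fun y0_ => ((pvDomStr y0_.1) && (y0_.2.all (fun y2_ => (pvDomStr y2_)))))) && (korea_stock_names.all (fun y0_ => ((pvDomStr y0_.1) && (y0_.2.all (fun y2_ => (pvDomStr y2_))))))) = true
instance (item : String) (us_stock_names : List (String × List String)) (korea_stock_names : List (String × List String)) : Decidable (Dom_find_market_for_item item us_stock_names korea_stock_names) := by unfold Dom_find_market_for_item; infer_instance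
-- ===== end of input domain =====

-- B builds a reverse-lookup dict (name -> (label, market)) with setdefault in priority order, then answers with one lookup; alternative traversal shape, same cost.


-- ===== PORT A =====
-- inner loop: for name in names: if item == name: return …
def pvFindInNames (item : String) : List String → Bool
  | [] => false
  | n :: rest => if item = n then true else pvFindInNames item rest

-- outer loop: for market, names in d.items(): …
def pvScanA (item : String) : List (String × List String) → Option String
  | [] => none
  | (market, names) :: rest =>
      if pvFindInNames item names then some market else pvScanA item rest

def find_market_for_item (item : String) (us_stock_names : List (String × List String)) (korea_stock_names : List (String × List String)) : Option String × Option String :=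
  match pvScanA item us_stock_names with
  | some market => (some "US Stock Market", some market)
  | none =>
    match pvScanA item korea_stock_names with
    | some market => (some "Korea Stock Market", some market)
    | none => (none, none)

-- ===== PORT B =====
-- one group of Source B's build loop: for name in names: index.setdefault(name, (label, market))
def pvBuildGroup (label : String) (d : PySem.Dict String (String × String)) (p : String × List String) : PySem.Dict String (String × String) :=
  p.2.foldl (fun d n => d.setdefault n (label, p.1)) d

def find_market_for_item_alt (item : String) (us_stock_names : List (String × List String)) (korea_stock_names : List (String × List String)) : Option String × Option String :=
  match (korea_stock_names.foldl (pvBuildGroup "Korea Stock Market")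
      (us_stock_names.foldl (pvBuildGroup "US Stock Market") PySem.Dict.empty)).get? item with
  | some (label, market) => (some label, some market)
  | none => (none, none)

-- ===== PRECONDITION & SPEC =====
def Spec_find_market_for_item (item : String) (us_stock_names : List (String × List String)) (korea_stock_names : List (String × List String)) (out : Option String × Option String) : Prop := out = find_market_for_item_alt item us_stock_names korea_stock_names
instance (item : String) (us_stock_names : List (String × List String)) (korea_stock_names : List (String × List String)) (out : Option String × Option String) : Decidable (Spec_find_market_for_item item us_stock_names korea_stock_names out) := by unfold Spec_find_market_for_item; infer_instance

-- ===== CLAIM (what is proved, stated in full; the proofs are below) =====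
def Claim_equal_find_market_for_item : Prop := ∀ (item : String) (us_stock_names : List (String × List String)) (korea_stock_names : List (String × List String)), Dom_find_market_for_item item us_stock_names korea_stock_names → Spec_find_market_for_item item us_stock_names korea_stock_names (find_market_for_item item us_stock_names korea_stock_names)

-- ===== LEMMAS AND PROOFS =====

theorem pv_get?_setdefault (d : PySem.Dict String (String × String)) (k k' : String) (v : String × String) :
    (d.setdefault k v).get? k' = (d.get? k').or (if k' = k then some v else none) := by
  by_cases hc : d.contains k = true
  · rw [PySem.Dict.setdefault_of_contains d v hc]
    by_cases hk : k' = k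
    · subst hk
      rcases ho : d.get? k' with _ | w
      · rw [PySem.Dict.get?_eq_none_iff_contains] at ho
        simp [ho] at hc
      · simp
    · simp [hk]
  · rw [PySem.Dict.setdefault_of_not_contains d v (by simpa using hc)]
    rw [PySem.Dict.get?_insert]
    by_cases hk : k' = k
    · subst hk
      have : d.get? k' = none := by
        rw [PySem.Dict.get?_eq_none_iff_contains]; simpa using hc
      simp [this]
    · simp [hk]

theorem pv_get?_fold_names (label m : String) (names : List String)
    (d : PySem.Dict String (String × String)) (k : String) :
    ((names.foldl (fun d n => d.setdefault n (label, m)) d).get? k)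
      = (d.get? k).or (if pvFindInNames k names then some (label, m) else none) := by
  induction names generalizing d with
  | nil => simp [pvFindInNames]
  | cons n rest ih =>
      simp only [List.foldl_cons, ih, pv_get?_setdefault, pvFindInNames]
      by_cases hk : k = n <;> rcases d.get? k with _ | w <;> simp [hk]

theorem pv_get?_fold_groups (label : String) (l : List (String × List String))
    (d : PySem.Dict String (String × String)) (k : String) :
    ((l.foldl (pvBuildGroup label) d).get? k)
      = (d.get? k).or ((pvScanA k l).map (fun m => (label, m))) := by
  induction l generalizing d with
  | nil => simp [pvScanA]
  | cons p rest ih =>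
      obtain ⟨m, names⟩ := p
      simp only [List.foldl_cons, ih, pvBuildGroup, pv_get?_fold_names, pvScanA]
      by_cases hf : pvFindInNames k names <;> rcases d.get? k with _ | w <;> simp [hf]

-- ===== VERDICT (by name: the statement is the Claim_ definition above) =====
theorem find_market_for_item_spec : Claim_equal_find_market_for_item := by
  intro item us korea _
  unfold Spec_find_market_for_item find_market_for_item find_market_for_item_alt
  rw [pv_get?_fold_groups, pv_get?_fold_groups]
  simp only [PySem.Dict.get?_empty, Option.none_or]
  rcases pvScanA item us with _ | m₁ <;> rcases pvScanA item korea with _ | m₂ <;> simp
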